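-- pv_equiv track=rewrite | github.com/hansd410/myFastQA | lib/model.py | sortSentenceList
-- ===== SOURCE A (Python) =====
-- def sortSentenceList(sentenceList):
-- 	batchSize = len(sentenceList)
--
-- 	seqInfoList = []
-- 	unsortedTokenLenList = []
-- 	for i in range(batchSize):
-- 		sentence = sentenceList[i]
-- 		tokenLen = len(sentence.split(' '))
-- 		unsortedTokenLenList.append(tokenLen)
-- 		seqInfoList.append((i,sentence,tokenLen))
--
-- 	seqInfoList.sort(key=lambda x:x[2],reverse=True)
-- 	sortIndexList,sortedSentenceList,sortedTokenLenList = zip(*seqInfoList)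
--
-- 	sortIndexList = list(sortIndexList)
-- 	sortedSentenceList = list(sortedSentenceList)
-- 	sortedTokenLenList = list(sortedTokenLenList)
--
-- 	unsortIndexList = [0]*len(sortIndexList)
-- 	for i in range(len(sortIndexList)):
-- 		unsortIndexList[sortIndexList[i]]=i
--
-- 	return sortedSentenceList,sortIndexList,unsortIndexList,sortedTokenLenList,unsortedTokenLenList
-- ===== SOURCE B (Python) =====
-- def sortSentenceList(sentenceList):
--     # Pigeonhole-style: no comparison sort of the n items; only the distinct
--     # token lengths are sorted, then indices are collected per length value.
--     unsortedTokenLenList = [len(s.split(' ')) for s in sentenceList]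
--     sortIndexList = []
--     for L in sorted(set(unsortedTokenLenList), reverse=True):
--         sortIndexList.extend(i for i in range(len(sentenceList))
--                              if unsortedTokenLenList[i] == L)
--     sortedSentenceList = [sentenceList[i] for i in sortIndexList]
--     sortedTokenLenList = [unsortedTokenLenList[i] for i in sortIndexList]
--     unsortIndexList = [0] * len(sortIndexList)
--     for pos in range(len(sortIndexList)):
--         unsortIndexList[sortIndexList[pos]] = pos
--     return sortedSentenceList, sortIndexList, unsortIndexList, sortedTokenLenList, unsortedTokenLenList
-- ===== Notes on version B (the rewrite author's own statement) =====
-- stated objective: alternative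
-- what changed: B never comparison-sorts the n sentences: it computes the token-length list, sorts only the DISTINCT length values descending, and for each value collects the matching indices by a scan of the index range (pigeonhole grouping), which reproduces the stable descending order; the other four outputs are gathered from that index list.
-- outside the precondition, e.g. on sortSentenceList([]): A raises ValueError, B returns ([], [], [], [], [])
-- crash fix: On the empty list A raises ValueError (zip(*[]) unpacks nothing) while B returns ([], [], [], [], []). — e.g. on sortSentenceList([]): A raises ValueError, B returns ([], [], [], [], [])
import Mathlib
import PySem

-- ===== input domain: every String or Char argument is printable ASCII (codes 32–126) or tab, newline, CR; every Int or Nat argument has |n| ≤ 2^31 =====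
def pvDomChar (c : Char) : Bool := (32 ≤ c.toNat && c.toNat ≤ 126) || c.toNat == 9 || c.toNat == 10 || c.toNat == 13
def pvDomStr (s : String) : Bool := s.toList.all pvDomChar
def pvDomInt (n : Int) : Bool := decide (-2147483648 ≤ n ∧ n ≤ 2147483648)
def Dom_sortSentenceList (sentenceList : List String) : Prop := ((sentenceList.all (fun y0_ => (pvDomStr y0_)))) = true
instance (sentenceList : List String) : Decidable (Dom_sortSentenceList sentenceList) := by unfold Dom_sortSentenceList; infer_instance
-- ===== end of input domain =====

-- B never comparison-sorts the n sentences: it sorts only the DISTINCT token-length values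
-- descending and collects matching indices per value (pigeonhole grouping); objective: alternative.


-- ===== PORT A =====
-- len(s.split(' ')): the separator is nonempty, so split? never returns none
def pvTokLen (s : String) : Int := (((PySem.Str.split? s " ").getD []).length : Int)

def sortSentenceList (sentenceList : List String) : List String × List Int × List Int × List Int × List Int :=
  let batchSize : Int := PySem.List.len sentenceList
  -- the for-loop appends to unsortedTokenLenList and seqInfoList; one fold with both accumulators
  let p := (PySem.List.pyRange 0 batchSize).foldl
    (fun (acc : List Int × List (Int × String × Int)) i =>
      let sentence := PySem.List.pyGetD sentenceList i ""
      let tokenLen := pvTokLen sentence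
      (acc.1 ++ [tokenLen], acc.2 ++ [(i, sentence, tokenLen)])) ([], [])
  let unsortedTokenLenList := p.1
  let seqInfoList := PySem.List.sorted p.2 (fun x => x.2.2) true
  -- zip(*seqInfoList) (raises on the empty list, excluded by Pre_) = the three projections
  let sortIndexList := seqInfoList.map (fun x => x.1)
  let sortedSentenceList := seqInfoList.map (fun x => x.2.1)
  let sortedTokenLenList := seqInfoList.map (fun x => x.2.2)
  -- indices stored in sortIndexList are 0 ≤ i < batchSize, so plain .set/.toNat is Python's assignment
  let unsortIndexList := (PySem.List.pyRange 0 (PySem.List.len sortIndexList)).foldl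
    (fun acc i => acc.set (PySem.List.pyGetD sortIndexList i 0).toNat i)
    (List.replicate sortIndexList.length 0)
  (sortedSentenceList, sortIndexList, unsortIndexList, sortedTokenLenList, unsortedTokenLenList)

-- ===== PORT B =====
def sortSentenceList_alt (sentenceList : List String) : List String × List Int × List Int × List Int × List Int :=
  let unsortedTokenLenList := sentenceList.map pvTokLen
  -- for L in sorted(set(lens), reverse=True): extend with the indices whose length == L
  let sortIndexList := (PySem.List.sorted (PySem.Set.ofList unsortedTokenLenList) (fun x => x) true).foldl
    (fun acc L => acc ++ (PySem.List.pyRange 0 (PySem.List.len sentenceList)).filter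
        (fun i => PySem.List.pyGetD unsortedTokenLenList i 0 == L)) []
  let sortedSentenceList := sortIndexList.map (fun i => PySem.List.pyGetD sentenceList i "")
  let sortedTokenLenList := sortIndexList.map (fun i => PySem.List.pyGetD unsortedTokenLenList i 0)
  let unsortIndexList := (PySem.List.pyRange 0 (PySem.List.len sortIndexList)).foldl
    (fun acc pos => acc.set (PySem.List.pyGetD sortIndexList pos 0).toNat pos)
    (List.replicate sortIndexList.length 0)
  (sortedSentenceList, sortIndexList, unsortIndexList, sortedTokenLenList, unsortedTokenLenList)

-- ===== PRECONDITION & SPEC =====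
-- Pre_ excludes only the empty list, on which A raises ValueError (zip(*[]) unpacks nothing).
def Pre_sortSentenceList (sentenceList : List String) : Prop := sentenceList ≠ []
instance (sentenceList : List String) : Decidable (Pre_sortSentenceList sentenceList) := by unfold Pre_sortSentenceList; infer_instance
def pvWitness_sortSentenceList : List String := ["a b", "c"]

-- On the empty list A raises ValueError while B returns five empty lists.
def Raises_sortSentenceList (sentenceList : List String) : Prop := sentenceList = []
instance (sentenceList : List String) : Decidable (Raises_sortSentenceList sentenceList) := by unfold Raises_sortSentenceList; infer_instance
def pvRaiseWitness_sortSentenceList : List String := []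
def pvRaiseWitnessOut_sortSentenceList : List String × List Int × List Int × List Int × List Int := ([], [], [], [], [])

def Spec_sortSentenceList (sentenceList : List String) (out : List String × List Int × List Int × List Int × List Int) : Prop := out = sortSentenceList_alt sentenceList
instance (sentenceList : List String) (out : List String × List Int × List Int × List Int × List Int) : Decidable (Spec_sortSentenceList sentenceList out) := by unfold Spec_sortSentenceList; infer_instance

-- ===== CLAIM (what is proved, stated in full; the proofs are below) =====
def Claim_equal_sortSentenceList : Prop := ∀ (sentenceList : List String), Dom_sortSentenceList sentenceList → Pre_sortSentenceList sentenceList → Spec_sortSentenceList sentenceList (sortSentenceList sentenceList)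
def Claim_raises_sortSentenceList : Prop := (∀ (sentenceList : List String), Dom_sortSentenceList sentenceList → Raises_sortSentenceList sentenceList → ¬ Pre_sortSentenceList sentenceList) ∧ (Dom_sortSentenceList (pvRaiseWitness_sortSentenceList) ∧ Raises_sortSentenceList (pvRaiseWitness_sortSentenceList) ∧ sortSentenceList_alt (pvRaiseWitness_sortSentenceList) = pvRaiseWitnessOut_sortSentenceList)

-- ===== LEMMAS AND PROOFS =====

-- the "stable descending" order on indices: larger key first, ties by smaller index first
def pvR (k : Int → Int) (a b : Int) : Prop := k b < k a ∨ (k a = k b ∧ a < b)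

-- inserting a fresh largest index keeps the stable-descending order
theorem pv_insertBy_stable (k : Int → Int) (x : Int) (acc : List Int)
    (h1 : acc.Pairwise (pvR k)) (h2 : ∀ a ∈ acc, a < x) :
    (PySem.List.insertBy (fun a b => decide (k b < k a)) x acc).Pairwise (pvR k) := by
  induction acc with
  | nil => simp [PySem.List.insertBy, pvR]
  | cons y t ih =>
    rw [List.pairwise_cons] at h1
    simp only [PySem.List.insertBy]
    by_cases h : k y < k x
    · simp only [h, decide_true, if_true]
      refine List.pairwise_cons.2 ⟨?_, List.pairwise_cons.2 ⟨h1.1, h1.2⟩⟩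
      intro z hz
      rcases List.mem_cons.1 hz with rfl | hz
      · exact Or.inl h
      · rcases h1.1 z hz with hlt | ⟨heq, _⟩
        · exact Or.inl (lt_trans hlt h)
        · exact Or.inl (heq ▸ h)
    · simp only [h, decide_false, Bool.false_eq_true, if_false]
      refine List.pairwise_cons.2 ⟨?_, ih h1.2 (fun a ha => h2 a (by simp [ha]))⟩
      intro z hz
      rcases (PySem.List.mem_insertBy _ x z t).1 hz with rfl | hz
      · rcases lt_or_eq_of_le (le_of_not_gt h) with hlt | heq
        · exact Or.inl hlt
        · exact Or.inr ⟨heq.symm, h2 y (by simp)⟩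
      · exact h1.1 z hz

-- the insertion-sort fold preserves the stable-descending order when inputs arrive increasing
theorem pv_foldl_stable (k : Int → Int) : ∀ (rest acc : List Int),
    acc.Pairwise (pvR k) → (∀ a ∈ acc, ∀ x ∈ rest, a < x) → rest.Pairwise (· < ·) →
    (rest.foldl (fun acc x => PySem.List.insertBy (fun a b => decide (k b < k a)) x acc) acc).Pairwise (pvR k) := by
  intro rest
  induction rest with
  | nil => intro acc h _ _; simpa using h
  | cons x t ih =>
    intro acc h1 h2 h3
    rw [List.pairwise_cons] at h3
    simp only [List.foldl_cons]
    refine ih _ (pv_insertBy_stable k x acc h1 (fun a ha => h2 a ha x (by simp))) ?_ h3.2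
    intro a ha y hy
    rcases (PySem.List.mem_insertBy _ x a acc).1 ha with rfl | ha
    · exact h3.1 y hy
    · exact h2 a ha y (by simp [hy])

-- Python's stable reverse sort of a strictly increasing index list is pvR-ordered
theorem pv_sorted_stable (k : Int → Int) (xs : List Int) (h : xs.Pairwise (· < ·)) :
    (PySem.List.sorted xs k true).Pairwise (pvR k) := by
  rw [PySem.List.sorted_rev_eq_foldl_insertBy]
  exact pv_foldl_stable k xs [] (by simp) (by simp) h

-- grouping by a covering, duplicate-free key list is a permutation of the original
theorem pv_flatMap_perm (k : Int → Int) : ∀ (ks xs : List Int), ks.Nodup → (∀ x ∈ xs, k x ∈ ks) →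
    (ks.flatMap fun v => xs.filter (fun x => k x == v)).Perm xs := by
  intro ks
  induction ks with
  | nil =>
    intro xs _ hcov
    have : xs = [] := by
      cases xs with
      | nil => rfl
      | cons a t => exact absurd (hcov a (by simp)) (by simp)
    simp [this]
  | cons v ks ih =>
    intro xs hnd hcov
    rw [List.nodup_cons] at hnd
    simp only [List.flatMap_cons]
    have hrw : (ks.flatMap fun v' => xs.filter (fun x => k x == v'))
        = ks.flatMap fun v' => (xs.filter (fun x => !(k x == v))).filter (fun x => k x == v') := by
      refine List.flatMap_congr ?_
      intro v' hv'
      rw [List.filter_filter]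
      apply List.filter_congr
      intro x _
      by_cases hx : k x = v'
      · have hne : v' ≠ v := fun hh => hnd.1 (hh ▸ hv')
        simp [hx, hne]
      · simp [hx]
    rw [hrw]
    have hcov' : ∀ x ∈ xs.filter (fun x => !(k x == v)), k x ∈ ks := by
      intro x hx
      rw [List.mem_filter] at hx
      have := hcov x hx.1
      simp only [List.mem_cons] at this
      rcases this with h | h
      · exfalso; simp [h] at hx
      · exact h
    have htail := ih (xs.filter (fun x => !(k x == v))) hnd.2 hcov'
    exact (List.Perm.append_left _ htail).trans (List.filter_append_perm _ xs)

-- grouping by strictly descending key values over increasing indices is pvR-ordered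
theorem pv_flatMap_pairwise (k : Int → Int) (ks xs : List Int)
    (hks : ks.Pairwise (fun a b => b < a)) (hxs : xs.Pairwise (· < ·)) :
    (ks.flatMap fun v => xs.filter (fun x => k x == v)).Pairwise (pvR k) := by
  rw [List.pairwise_flatMap]
  constructor
  · intro v _
    refine (List.Pairwise.filter _ hxs).imp_of_mem ?_
    intro a b ha hb hab
    rw [List.mem_filter] at ha hb
    exact Or.inr ⟨by rw [eq_of_beq ha.2, eq_of_beq hb.2], hab⟩
  · refine hks.imp_of_mem ?_
    intro a b _ _ hab x hx y hy
    rw [List.mem_filter] at hx hy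
    exact Or.inl (by rw [eq_of_beq hx.2, eq_of_beq hy.2]; exact hab)

-- MAIN: the stable descending argsort equals the pigeonhole grouping by distinct lengths
theorem pv_pigeonhole (lens : List Int) (n : Int) (hn : n = (lens.length : Int)) :
    PySem.List.sorted (PySem.List.pyRange 0 n) (fun i => PySem.List.pyGetD lens i 0) true
      = (PySem.List.sorted (PySem.Set.ofList lens) (fun x => x) true).flatMap
          (fun v => (PySem.List.pyRange 0 n).filter (fun i => PySem.List.pyGetD lens i 0 == v)) := by
  subst hn
  set k : Int → Int := fun i => PySem.List.pyGetD lens i 0 with hk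
  set xs := PySem.List.pyRange 0 (lens.length : Int) with hxsdef
  set ks := PySem.List.sorted (PySem.Set.ofList lens) (fun x => x) true with hksdef
  have hxs : xs.Pairwise (· < ·) := by
    rw [hxsdef, PySem.List.pyRange_zero_natCast]
    exact (List.pairwise_map).2 ((List.pairwise_lt_range).imp (by exact_mod_cast fun h => h))
  have hks_nodup : ks.Nodup :=
    ((PySem.List.sorted_perm _ _ _).nodup_iff).2 (PySem.Set.nodup_ofList lens)
  have hks_desc : ks.Pairwise (fun a b => b < a) := by
    have h1 : ks.Pairwise (fun a b => b ≤ a) := PySem.List.sorted_pairwise_rev _ _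
    exact (h1.and hks_nodup).imp (fun h => lt_of_le_of_ne h.1 (Ne.symm h.2))
  have hcov : ∀ i ∈ xs, k i ∈ ks := by
    intro i hi
    rcases PySem.List.mem_pyRange_one.1 hi with ⟨h0, h1⟩
    have hki : k i = lens[i.toNat] := PySem.List.pyGetD_eq_getElem lens 0 h0 h1
    rw [hksdef, PySem.List.mem_sorted, PySem.Set.mem_ofList, hki]
    exact List.getElem_mem _
  have hperm : (PySem.List.sorted xs k true).Perm
      (ks.flatMap fun v => xs.filter (fun x => k x == v)) :=
    (PySem.List.sorted_perm _ _ _).trans (pv_flatMap_perm k ks xs hks_nodup hcov).symm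
  refine List.Perm.eq_of_pairwise ?_ (pv_sorted_stable k xs hxs)
    (pv_flatMap_pairwise k ks xs hks_desc hxs) hperm
  intro a b _ _ h1 h2
  rcases h1 with h1 | h1 <;> rcases h2 with h2 | h2 <;> omega

-- ===== lemmas reducing port A to the argsort form =====

-- map commutes with insertBy when the comparison factors through the map
theorem pv_insertBy_map {α β : Type} (f : α → β) (b1 : β → β → Bool) (b2 : α → α → Bool)
    (hb : ∀ a a', b1 (f a) (f a') = b2 a a') (x : α) (ys : List α) :
    PySem.List.insertBy b1 (f x) (ys.map f) = (PySem.List.insertBy b2 x ys).map f := by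
  induction ys with
  | nil => simp [PySem.List.insertBy]
  | cons y t ih =>
    simp only [List.map_cons, PySem.List.insertBy, hb]
    by_cases h : b2 x y
    · simp [h]
    · simp [h, ih]

theorem pv_foldl_insertBy_map {α β : Type} (f : α → β) (b1 : β → β → Bool) (b2 : α → α → Bool)
    (hb : ∀ a a', b1 (f a) (f a') = b2 a a') (l acc : List α) :
    (l.map f).foldl (fun acc x => PySem.List.insertBy b1 x acc) (acc.map f)
      = (l.foldl (fun acc x => PySem.List.insertBy b2 x acc) acc).map f := by
  induction l generalizing acc with
  | nil => simp
  | cons x t ih =>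
    simp only [List.map_cons, List.foldl_cons]
    rw [pv_insertBy_map f b1 b2 hb, ih]

-- sorted of a mapped list (reverse=True) = map of sorted under the composed key
theorem pv_sorted_map {α β κ : Type} [LinearOrder κ] (f : α → β) (k : β → κ) (l : List α) :
    PySem.List.sorted (l.map f) k true = (PySem.List.sorted l (fun x => k (f x)) true).map f := by
  rw [PySem.List.sorted_rev_eq_foldl_insertBy, PySem.List.sorted_rev_eq_foldl_insertBy]
  simpa using pv_foldl_insertBy_map f (fun a b => decide (k b < k a))
    (fun a b => decide (k (f b) < k (f a))) (fun _ _ => rfl) l []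

theorem pv_insertBy_congr {α κ : Type} [LinearOrder κ] (k1 k2 : α → κ) (x : α) (ys : List α)
    (hx : k1 x = k2 x) (hys : ∀ y ∈ ys, k1 y = k2 y) :
    PySem.List.insertBy (fun a b => decide (k1 b < k1 a)) x ys
      = PySem.List.insertBy (fun a b => decide (k2 b < k2 a)) x ys := by
  induction ys with
  | nil => rfl
  | cons y t ih =>
    have hy : k1 y = k2 y := hys y (by simp)
    simp only [PySem.List.insertBy, hx, hy]
    by_cases h : k2 y < k2 x
    · simp [h]
    · simp [h, ih (fun z hz => hys z (by simp [hz]))]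

-- sorted depends on the key only through its values on the list's members
theorem pv_sorted_key_congr {α κ : Type} [LinearOrder κ] (k1 k2 : α → κ) (l : List α)
    (h : ∀ x ∈ l, k1 x = k2 x) :
    PySem.List.sorted l k1 true = PySem.List.sorted l k2 true := by
  rw [PySem.List.sorted_rev_eq_foldl_insertBy, PySem.List.sorted_rev_eq_foldl_insertBy]
  suffices H : ∀ (t acc : List α), (∀ x ∈ t, k1 x = k2 x) → (∀ x ∈ acc, k1 x = k2 x) →
      t.foldl (fun acc x => PySem.List.insertBy (fun a b => decide (k1 b < k1 a)) x acc) acc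
        = t.foldl (fun acc x => PySem.List.insertBy (fun a b => decide (k2 b < k2 a)) x acc) acc by
    exact H l [] h (by simp)
  intro t
  induction t with
  | nil => intro acc _ _; rfl
  | cons x t ih =>
    intro acc ht hacc
    have hx : k1 x = k2 x := ht x (by simp)
    simp only [List.foldl_cons]
    rw [pv_insertBy_congr k1 k2 x acc hx hacc]
    exact ih _ (fun z hz => ht z (by simp [hz]))
      (fun z hz => by
        rcases (PySem.List.mem_insertBy _ x z acc).1 hz with h' | h'
        · exact h' ▸ hx
        · exact hacc z h')

theorem sortSentenceList_spec : Claim_equal_sortSentenceList := by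
  intro sentenceList _ _
  unfold Spec_sortSentenceList sortSentenceList sortSentenceList_alt
  simp only []
  set sl := sentenceList with hsl
  rw [PySem.List.foldl_prod_mk
      (f := fun (acc : List Int) (i : Int) => acc ++ [pvTokLen (PySem.List.pyGetD sl i "")])
      (g := fun (acc : List (Int × String × Int)) (i : Int) =>
        acc ++ [(i, PySem.List.pyGetD sl i "", pvTokLen (PySem.List.pyGetD sl i ""))])]
  rw [PySem.List.foldl_append_singleton_eq_map, PySem.List.foldl_append_singleton_eq_map]
  simp only [List.nil_append]
  -- the unsorted length list: range-indexed map = direct map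
  have hlens : (PySem.List.pyRange 0 (PySem.List.len sl)).map
      (fun i => pvTokLen (PySem.List.pyGetD sl i "")) = sl.map pvTokLen := by
    have := PySem.List.map_pyGetD_pyRange_zero sl ""
    calc (PySem.List.pyRange 0 (PySem.List.len sl)).map
          (fun i => pvTokLen (PySem.List.pyGetD sl i ""))
        = ((PySem.List.pyRange 0 (PySem.List.len sl)).map
            (fun i => PySem.List.pyGetD sl i "")).map pvTokLen := by
          rw [List.map_map]; rfl
      _ = sl.map pvTokLen := by rw [this]
  -- sorting the triples = mapping the argsort
  rw [pv_sorted_map (fun i : Int => (i, PySem.List.pyGetD sl i "", pvTokLen (PySem.List.pyGetD sl i "")))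
      (fun x : Int × String × Int => x.2.2)]
  have hkey : PySem.List.sorted (PySem.List.pyRange 0 (PySem.List.len sl))
      (fun i => pvTokLen (PySem.List.pyGetD sl i "")) true
      = PySem.List.sorted (PySem.List.pyRange 0 (PySem.List.len sl))
        (fun i => PySem.List.pyGetD (sl.map pvTokLen) i 0) true := by
    apply pv_sorted_key_congr
    intro i hi
    rcases PySem.List.mem_pyRange_one.1 hi with ⟨h0, h1⟩
    have h1' : i < (sl.length : Int) := by simpa [PySem.List.len] using h1
    have h1m : i < ((sl.map pvTokLen).length : Int) := by simpa using h1'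
    rw [PySem.List.pyGetD_eq_getElem sl "" h0 h1', PySem.List.pyGetD_eq_getElem _ 0 h0 h1m,
      List.getElem_map]
  simp only [hkey, List.map_map]
  -- B's fold-of-appends is the flatMap grouping; by pv_pigeonhole it is the same index list
  rw [PySem.List.foldl_append_eq_flatMap, List.nil_append]
  rw [← pv_pigeonhole (sl.map pvTokLen) (PySem.List.len sl)
      (by simp [PySem.List.len])]
  set idx := PySem.List.sorted (PySem.List.pyRange 0 (PySem.List.len sl))
      (fun i => PySem.List.pyGetD (sl.map pvTokLen) i 0) true with hidx
  have hmem : ∀ i ∈ idx, 0 ≤ i ∧ i < (sl.length : Int) := by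
    intro i hi
    have : i ∈ PySem.List.pyRange 0 (PySem.List.len sl) := (PySem.List.mem_sorted _ _ _ _).1 hi
    rcases PySem.List.mem_pyRange_one.1 this with ⟨h0, h1⟩
    exact ⟨h0, by simpa [PySem.List.len] using h1⟩
  have htok : idx.map (fun i : Int => pvTokLen (PySem.List.pyGetD sl i ""))
      = idx.map (fun i => PySem.List.pyGetD (sl.map pvTokLen) i 0) := by
    apply List.map_congr_left
    intro i hi
    rcases hmem i hi with ⟨h0, h1⟩
    have h1m : i < ((sl.map pvTokLen).length : Int) := by simpa using h1
    rw [PySem.List.pyGetD_eq_getElem sl "" h0 h1, PySem.List.pyGetD_eq_getElem _ 0 h0 h1m,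
      List.getElem_map]
  refine Prod.ext ?_ (Prod.ext ?_ (Prod.ext ?_ (Prod.ext ?_ ?_))) <;>
    simp only [Function.comp_def, hlens, htok] <;> simp

@[simp] theorem sortSentenceList_raises : Claim_raises_sortSentenceList := by
  unfold Claim_raises_sortSentenceList
  constructor
  · intro l _ hr
    simp [Raises_sortSentenceList, Pre_sortSentenceList] at *
    exact hr
  · exact ⟨by decide, by decide, by decide⟩
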